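-- pv_equiv track=rewrite | github.com/TomGiaco/Simple-Interpreter | table.py | split_by_semicolumn
-- ===== SOURCE A (Python) =====
-- def split_by_semicolumn(l):
--     new_list = []
--     sublist = []
--     for words in l:
--         sublist.append(words)
--         if words == ";":
--             new_list.append(sublist)
--             sublist = []
--     return new_list
-- ===== SOURCE B (Python) =====
-- def split_by_semicolumn(l):
--     # Recursive find-and-slice: locate the first ";", emit the slice up to
--     # and including it, and recurse on the remainder; the tail after the
--     # last ";" is never emitted, matching A.
--     if ";" not in l:
--         return []
--     i = l.index(";")
--     return [l[:i + 1]] + split_by_semicolumn(l[i + 1:])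
-- ===== Notes on version B (the rewrite author's own statement) =====
-- stated objective: alternative
-- what changed: Replaced A's single-pass append-and-flush accumulator loop by a recursive find-and-slice decomposition: find the first ';' with list.index, slice the group out, recurse on the rest.
import Mathlib
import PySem

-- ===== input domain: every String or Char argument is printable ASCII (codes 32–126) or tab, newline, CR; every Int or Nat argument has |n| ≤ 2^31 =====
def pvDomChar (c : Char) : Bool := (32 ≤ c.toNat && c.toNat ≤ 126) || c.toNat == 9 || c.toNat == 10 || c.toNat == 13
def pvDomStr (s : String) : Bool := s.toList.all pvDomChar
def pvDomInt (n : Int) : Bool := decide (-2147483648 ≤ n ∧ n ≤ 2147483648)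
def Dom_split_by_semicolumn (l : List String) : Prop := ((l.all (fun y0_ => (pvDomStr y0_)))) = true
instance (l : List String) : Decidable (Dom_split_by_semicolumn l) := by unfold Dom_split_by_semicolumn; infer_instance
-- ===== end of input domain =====

-- B replaces A's append-and-flush accumulator loop by a recursive find-first-';'-and-slice
-- decomposition (alternative structure, same behaviour).


-- ===== PORT A =====
-- A: fold over the words keeping (new_list, sublist); flush sublist on ";".
def split_by_semicolumn (l : List String) : List (List String) :=
  (l.foldl
    (fun (st : List (List String) × List String) (words : String) =>
      let sublist := st.2 ++ [words]
      if words = ";" then (st.1 ++ [sublist], ([] : List String)) else (st.1, sublist))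
    (([] : List (List String)), ([] : List String))).1

-- ===== PORT B =====
-- helper lemma needed by the port's termination proof
theorem pv_drop_lt (l : List String) (i : Nat) (h : PySem.List.index? l ";" = some i) :
    (PySem.List.slice l (some ((i : Int) + 1)) none).length < l.length := by
  obtain ⟨hk, -, -⟩ := PySem.List.getElem_of_index?_eq_some h
  have hc : ((i : Int) + 1) = ((i + 1 : Nat) : Int) := by push_cast; ring
  rw [hc, PySem.List.slice_from_natCast]
  simp
  omega

-- B: find the first ";", slice the group up to and including it, recurse on the rest.
def split_by_semicolumn_alt (l : List String) : List (List String) :=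
  match h : PySem.List.index? l ";" with
  | none => []
  | some i =>
      PySem.List.slice l none (some ((i : Int) + 1)) ::
      split_by_semicolumn_alt (PySem.List.slice l (some ((i : Int) + 1)) none)
termination_by l.length
decreasing_by exact pv_drop_lt l i h

-- ===== PRECONDITION & SPEC =====
def Spec_split_by_semicolumn (l : List String) (out : List (List String)) : Prop := out = split_by_semicolumn_alt l
instance (l : List String) (out : List (List String)) : Decidable (Spec_split_by_semicolumn l out) := by unfold Spec_split_by_semicolumn; infer_instance

-- ===== CLAIM (what is proved, stated in full; the proofs are below) =====
def Claim_equal_split_by_semicolumn : Prop := ∀ (l : List String), Dom_split_by_semicolumn l → Spec_split_by_semicolumn l (split_by_semicolumn l)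

-- ===== LEMMAS AND PROOFS =====

-- canonical recursive description of A's grouping, with the pending sublist as parameter
def pvGroups (sub : List String) : List String → List (List String)
  | [] => []
  | w :: ws => if w = ";" then (sub ++ [w]) :: pvGroups [] ws else pvGroups (sub ++ [w]) ws

theorem pvA_loop (ws : List String) :
    ∀ (acc : List (List String)) (sub : List String),
    (ws.foldl
      (fun (st : List (List String) × List String) (words : String) =>
        let sublist := st.2 ++ [words]
        if words = ";" then (st.1 ++ [sublist], ([] : List String)) else (st.1, sublist))
      (acc, sub)).1 = acc ++ pvGroups sub ws := by
  induction ws with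
  | nil => intro acc sub; simp [pvGroups]
  | cons w ws ih =>
    intro acc sub
    by_cases hw : w = ";" <;> simp [List.foldl, hw, pvGroups, ih]

theorem pvGroups_nil_of_not_mem (ws : List String) (h : ";" ∉ ws) :
    ∀ sub, pvGroups sub ws = [] := by
  induction ws with
  | nil => intro _; rfl
  | cons w ws ih =>
    intro sub
    simp at h
    simp [pvGroups, Ne.symm h.1, ih h.2]

theorem pvGroups_of_index (ws : List String) :
    ∀ (i : Nat) (sub : List String), PySem.List.index? ws ";" = some i →
    pvGroups sub ws = (sub ++ ws.take (i + 1)) :: pvGroups [] (ws.drop (i + 1)) := by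
  induction ws with
  | nil => intro i sub h; simp [PySem.List.index?_eq_idxOf?] at h
  | cons w ws ih =>
    intro i sub h
    by_cases hw : w = ";"
    · subst hw
      rw [PySem.List.index?_cons_self] at h
      cases h
      simp [pvGroups]
    · rw [PySem.List.index?_cons_of_ne ws hw] at h
      obtain ⟨j, hj, rfl⟩ := Option.map_eq_some_iff.mp h
      simp [pvGroups, hw, ih j (sub ++ [w]) hj]

theorem pvAlt_eq_groups (l : List String) : split_by_semicolumn_alt l = pvGroups [] l := by
  induction l using split_by_semicolumn_alt.induct with
  | case1 l h =>
    rw [split_by_semicolumn_alt]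
    rw [h]
    exact (pvGroups_nil_of_not_mem l ((PySem.List.index?_eq_none_iff l ";").mp h) []).symm
  | case2 l i h ih =>
    rw [split_by_semicolumn_alt, h]
    simp only
    have hc : ((i : Int) + 1) = ((i + 1 : Nat) : Int) := by push_cast; ring
    rw [hc, PySem.List.slice_from_natCast] at ih
    rw [hc, PySem.List.slice_from_natCast, PySem.List.slice_to_natCast,
        pvGroups_of_index l i [] h, ih]
    simp

-- ===== VERDICT (by name: the statement is the Claim_ definition above) =====
theorem split_by_semicolumn_spec : Claim_equal_split_by_semicolumn := by
  intro l _
  unfold Spec_split_by_semicolumn split_by_semicolumn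
  rw [pvAlt_eq_groups, pvA_loop l [] []]
  simp
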